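-- pv_equiv track=rewrite | github.com/miliar/Code_Jam_Webscraper | solutions_python/Problem_178/3613.py | process
-- ===== SOURCE A (Python) =====
-- def process(item):
--     """Count the number of + to - transitions in the string."""
--     status = '+'
--     count = 0
--
--     for c in reversed(item):
--         if c != status:
--             status = c
--             count += 1
--
--     return count
-- ===== SOURCE B (Python) =====
-- def process(item):
--     """Count the number of + to - transitions in the string."""
--     count = sum(1 for a, b in zip(item, item[1:]) if a != b)
--     if item and item[-1] != '+':
--         count += 1
--     return count
-- ===== Notes on version B (the rewrite author's own statement) =====
-- stated objective: simpler
-- what changed: Replaced the reversed stateful sweep with a forward adjacent-pair count (zip of the string with its tail) plus a +1 correction when the last character is not '+'.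
import Mathlib
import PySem

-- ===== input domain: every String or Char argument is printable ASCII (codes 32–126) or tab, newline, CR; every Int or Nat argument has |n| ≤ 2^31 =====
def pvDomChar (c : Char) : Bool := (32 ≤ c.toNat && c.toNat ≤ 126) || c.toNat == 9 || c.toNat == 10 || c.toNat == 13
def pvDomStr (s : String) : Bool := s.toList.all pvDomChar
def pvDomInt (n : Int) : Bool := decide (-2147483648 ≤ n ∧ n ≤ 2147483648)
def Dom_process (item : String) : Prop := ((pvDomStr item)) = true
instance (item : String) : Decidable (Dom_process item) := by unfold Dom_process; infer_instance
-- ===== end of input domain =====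

-- B replaces A's reversed stateful sweep with a forward adjacent-pair count plus a
-- +1 correction when the last character is not '+' (objective: simpler).

-- ===== PORT A =====
-- A: scan reversed(item) with state (status, count), starting status '+'.
def process (item : String) : Int :=
  (item.toList.reverse.foldl
    (fun (st : Char × Int) c => if c ≠ st.1 then (c, st.2 + 1) else st)
    ('+', 0)).2

-- ===== PORT B =====
-- B: sum over zip(item, item[1:]) of adjacent differences, plus the trailing correction.
def process_alt (item : String) : Int :=
  let l := item.toList
  let count : Int :=
    (l.zip l.tail).foldl (fun acc p => acc + if p.1 ≠ p.2 then 1 else 0) 0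
  if l ≠ [] ∧ l.getLastD '+' ≠ '+' then count + 1 else count

-- ===== PRECONDITION & SPEC =====
def Spec_process (item : String) (out : Int) : Prop := out = process_alt item
instance (item : String) (out : Int) : Decidable (Spec_process item out) := by unfold Spec_process; infer_instance

-- ===== CLAIM (what is proved, stated in full; the proofs are below) =====
def Claim_equal_process : Prop := ∀ (item : String), Dom_process item → Spec_process item (process item)

-- ===== LEMMAS AND PROOFS =====

-- transitions of a list scanned left-to-right starting from status s
def pvT : Char → List Char → Int
  | _, [] => 0
  | s, x :: xs => (if x ≠ s then 1 else 0) + pvT x xs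

-- adjacent-pair transitions
def pvAdj : List Char → Int
  | [] => 0
  | [_] => 0
  | a :: b :: r => (if a ≠ b then 1 else 0) + pvAdj (b :: r)

theorem pvFoldA (l : List Char) : ∀ (s : Char) (c : Int),
    l.foldl (fun (st : Char × Int) c => if c ≠ st.1 then (c, st.2 + 1) else st) (s, c)
      = (l.getLastD s, c + pvT s l) := by
  induction l with
  | nil => intro s c; simp [pvT]
  | cons x xs ih =>
    intro s c
    simp only [List.foldl_cons, pvT, List.getLastD_cons]
    rw [show (if x ≠ s then ((x : Char), c + 1) else (s, c))
          = (x, c + if x ≠ s then 1 else 0) from by by_cases h : x = s <;> simp [h]]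
    rw [ih x]
    exact Prod.ext rfl (by ring)

theorem pvT_append (u v : List Char) : ∀ s, pvT s (u ++ v) = pvT s u + pvT (u.getLastD s) v := by
  induction u with
  | nil => intro s; simp [pvT]
  | cons x xs ih =>
    intro s
    simp only [List.cons_append, pvT, List.getLastD_cons, ih x, add_assoc]

theorem pvMain (l : List Char) : ∀ s, pvT s l.reverse = pvAdj l + (if l.getLastD s ≠ s then 1 else 0) := by
  induction l with
  | nil => intro s; simp [pvT, pvAdj]
  | cons x xs ih =>
    intro s
    rw [List.reverse_cons, pvT_append, ih s]
    cases xs with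
    | nil => simp [pvT, pvAdj]
    | cons y ys =>
      simp only [pvAdj, pvT, List.getLastD_cons]
      rw [show ((y :: ys).reverse).getLastD s = y from by
        simp [List.getLastD_eq_getLast?, List.getLast?_reverse]]
      ring

theorem pvZip (l : List Char) : ∀ (c : Int),
    (l.zip l.tail).foldl (fun acc p => acc + if p.1 ≠ p.2 then 1 else 0) c = c + pvAdj l := by
  induction l with
  | nil => intro c; simp [pvAdj]
  | cons a xs ih =>
    intro c
    cases xs with
    | nil => simp [pvAdj]
    | cons b r =>
      rw [List.tail_cons] at ih
      simp only [List.tail_cons, List.zip_cons_cons, List.foldl_cons, pvAdj]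
      rw [ih]
      ring

-- ===== VERDICT (by name: the statement is the Claim_ definition above) =====
theorem process_spec : Claim_equal_process := by
  intro item _
  unfold Spec_process process process_alt
  simp only [pvFoldA, pvZip, pvMain, zero_add]
  split_ifs with h1 h2 h2
  · rfl
  · rcases Classical.em (item.toList = []) with h | h
    · exact absurd (by simp [h, List.getLastD]) h1
    · exact absurd ⟨h, h1⟩ h2
  · exact absurd h2.2 h1
  · ring
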